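-- pv_equiv track=rewrite | github.com/PRKKILLER/Algorithm_Practice | Company-OA/Robinhood/DuplicateOnOneSegment.py | lsForUniqueChar
-- ===== SOURCE A (Python) =====
-- from  collections import defaultdict
--
-- def lsForUniqueChar(arr, h):
--     count = defaultdict(int)
--     unique = 0
--     no_less_than_2 = 0
--     start = 0
--     res = 0
--
--     for i, c in enumerate(arr):
--         count[c] += 1
--         if count[c] == 1:
--             unique += 1
--         if count[c] == 2:
--             no_less_than_2 += 1
--         while start <= i and unique > h:
--             if count[arr[start]] == 1:
--                 unique -= 1
--             if count[arr[start]] == 2: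
--                 no_less_than_2 -= 1
--             count[arr[start]] -= 1
--             start += 1
--         if unique == h and no_less_than_2 == h:
--             res = max(res, i - start + 1)
--
--     return res
-- ===== SOURCE B (Python) =====
-- # Brute force: examine every subarray, count its elements from scratch,
-- # keep the longest whose distinct values number exactly h and all occur >= 2 times.
-- def lsForUniqueChar(arr, h):
--     res = 0
--     for i in range(len(arr)):
--         for j in range(i, len(arr)):
--             cnt = {}
--             for c in arr[i:j + 1]:
--                 cnt[c] = cnt.get(c, 0) + 1
--             if len(cnt) == h and all(v >= 2 for v in cnt.values()):
--                 res = max(res, j - i + 1)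
--     return res
-- ===== Notes on version B (the rewrite author's own statement) =====
-- stated objective: simpler
-- what changed: Replaces the amortized sliding-window scan with incrementally maintained counters by a plain brute force that, for every subarray, recounts its elements from scratch and keeps the longest one with exactly h distinct values all occurring at least twice.
import Mathlib
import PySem

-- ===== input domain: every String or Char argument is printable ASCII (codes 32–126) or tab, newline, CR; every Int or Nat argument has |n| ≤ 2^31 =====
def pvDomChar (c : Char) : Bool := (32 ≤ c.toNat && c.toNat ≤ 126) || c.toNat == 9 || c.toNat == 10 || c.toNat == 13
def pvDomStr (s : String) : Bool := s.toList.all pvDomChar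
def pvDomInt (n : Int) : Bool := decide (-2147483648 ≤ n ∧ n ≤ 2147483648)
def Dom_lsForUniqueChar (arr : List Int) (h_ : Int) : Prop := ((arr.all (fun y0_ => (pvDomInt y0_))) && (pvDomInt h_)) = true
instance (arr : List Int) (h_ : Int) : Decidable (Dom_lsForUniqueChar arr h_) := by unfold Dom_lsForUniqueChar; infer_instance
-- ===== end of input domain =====

-- B re-implements the sliding-window scan as a plain brute force over all subarrays
-- (objective: simpler); return-value equivalence only, no arguments are mutated.


-- ===== PORT A =====
-- the inner `while start <= i and unique > h` loop; arr[start] is always in range on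
-- reachable states (0 ≤ start ≤ i < len arr), so pyGetD's default is never used
def shrinkA (arr : List Int) (h_ i : Int) (count : PySem.Dict Int Int)
    (unique no2 start : Int) : PySem.Dict Int Int × Int × Int × Int :=
  if h : start ≤ i ∧ unique > h_ then
    let c := PySem.List.pyGetD arr start 0
    let unique' := if count.getD c 0 = 1 then unique - 1 else unique
    let no2' := if count.getD c 0 = 2 then no2 - 1 else no2
    shrinkA arr h_ i (count.modify c 0 (· - 1)) unique' no2' (start + 1)
  else (count, unique, no2, start)
termination_by (i + 1 - start).toNat
decreasing_by omega

-- the body of `for i, c in enumerate(arr)`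
def stepA (arr : List Int) (h_ : Int)
    (S : PySem.Dict Int Int × Int × Int × Int × Int) (p : Int × Int) :
    PySem.Dict Int Int × Int × Int × Int × Int :=
  match S, p with
  | (count, unique, no2, start, res), (i, c) =>
    let count := count.modify c 0 (· + 1)
    let unique := if count.getD c 0 = 1 then unique + 1 else unique
    let no2 := if count.getD c 0 = 2 then no2 + 1 else no2
    let r := shrinkA arr h_ i count unique no2 start
    let res := if r.2.1 = h_ ∧ r.2.2.1 = h_ then max res (i - r.2.2.2 + 1) else res
    (r.1, r.2.1, r.2.2.1, r.2.2.2, res)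

def lsForUniqueChar (arr : List Int) (h_ : Int) : Int :=
  ((PySem.List.enumerate arr 0).foldl (stepA arr h_)
    (PySem.Dict.empty, 0, 0, 0, 0)).2.2.2.2

-- ===== PORT B =====
def lsForUniqueChar_alt (arr : List Int) (h_ : Int) : Int :=
  (PySem.List.pyRange 0 arr.length 1).foldl (fun res i =>
    (PySem.List.pyRange i arr.length 1).foldl (fun res j =>
      let seg := PySem.List.slice arr (some i) (some (j + 1))
      let cnt := seg.foldl (fun d c => d.insert c (d.getD c 0 + 1)) (PySem.Dict.empty : PySem.Dict Int Int)
      if (cnt.size : Int) = h_ ∧ cnt.values.all (fun v => 2 ≤ v) then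
        max res (j - i + 1)
      else res) res) 0

-- ===== PRECONDITION & SPEC =====
def Spec_lsForUniqueChar (arr : List Int) (h_ : Int) (out : Int) : Prop := out = lsForUniqueChar_alt arr h_
instance (arr : List Int) (h_ : Int) (out : Int) : Decidable (Spec_lsForUniqueChar arr h_ out) := by unfold Spec_lsForUniqueChar; infer_instance

-- ===== CLAIM (what is proved, stated in full; the proofs are below) =====
def Claim_equal_lsForUniqueChar : Prop := ∀ (arr : List Int) (h_ : Int), Dom_lsForUniqueChar arr h_ → Spec_lsForUniqueChar arr h_ (lsForUniqueChar arr h_)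

-- ===== LEMMAS AND PROOFS =====

-- the subarray arr[s:e]
def pvSeg (arr : List Int) (s e : Nat) : List Int := (arr.drop s).take (e - s)
-- number of distinct values
def pvU (L : List Int) : Nat := L.toFinset.card
-- number of distinct values occurring at least twice
def pvT (L : List Int) : Nat := (L.toFinset.filter (fun c => 2 ≤ L.count c)).card
-- the window predicate: exactly h_ distinct values, each occurring at least twice
def pvGood (h_ : Int) (L : List Int) : Bool :=
  ((pvU L : Int) == h_) && L.all (fun c => 2 ≤ L.count c)
-- candidate length of window [s, j]
def pvF (arr : List Int) (h_ : Int) (s j : Nat) : Nat :=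
  if pvGood h_ (pvSeg arr s (j + 1)) then j + 1 - s else 0
-- best result over all windows ending before k
def pvM (arr : List Int) (h_ : Int) (k : Nat) : Nat :=
  (Finset.range k).sup (fun j => (Finset.range (j + 1)).sup (fun s => pvF arr h_ s j))

lemma pvSeg_succ (arr : List Int) (s k : Nat) (hs : s ≤ k) (hk : k < arr.length) :
    pvSeg arr s (k + 1) = pvSeg arr s k ++ [arr[k]] := by
  unfold pvSeg
  have h1 : k + 1 - s = (k - s) + 1 := by omega
  rw [h1, List.take_add_one]
  congr 1
  rw [List.getElem?_drop]
  have h2 : s + (k - s) = k := by omega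
  rw [h2, List.getElem?_eq_getElem hk]
  rfl

lemma pvSeg_cons (arr : List Int) (s e : Nat) (hse : s < e) (hs : s < arr.length) :
    pvSeg arr s e = arr[s] :: pvSeg arr (s + 1) e := by
  unfold pvSeg
  rw [List.drop_eq_getElem_cons hs]
  have h1 : e - s = (e - (s + 1)) + 1 := by omega
  rw [h1, List.take_succ_cons]

lemma pvSeg_decomp (arr : List Int) (s s' e : Nat) (h1 : s ≤ s') (h2 : s' ≤ e) :
    pvSeg arr s e = (arr.drop s).take (s' - s) ++ pvSeg arr s' e := by
  unfold pvSeg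
  have h3 : e - s = (s' - s) + (e - s') := by omega
  rw [h3, List.take_add, List.drop_drop]
  have h4 : s + (s' - s) = s' := by omega
  rw [h4]

lemma pvU_cons (c : Int) (L : List Int) :
    pvU (c :: L) = pvU L + (if L.count c = 0 then 1 else 0) := by
  unfold pvU
  rw [List.toFinset_cons]
  by_cases hc : c ∈ L.toFinset
  · rw [Finset.insert_eq_self.mpr hc]
    have : L.count c ≠ 0 := by
      simp only [List.mem_toFinset] at hc
      simpa [List.count_eq_zero] using hc
    simp [this]
  · rw [Finset.card_insert_of_notMem hc]
    have : L.count c = 0 := by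
      simp only [List.mem_toFinset] at hc
      simpa [List.count_eq_zero] using hc
    simp [this]

lemma pvU_perm (L L' : List Int) (h : L.Perm L') : pvU L = pvU L' := by
  unfold pvU; rw [List.toFinset_eq_of_perm _ _ h]

lemma pvT_perm (L L' : List Int) (h : L.Perm L') : pvT L = pvT L' := by
  unfold pvT
  rw [List.toFinset_eq_of_perm _ _ h]
  congr 1
  apply Finset.filter_congr
  intro x _
  rw [List.Perm.count_eq h]

lemma pvU_append_singleton (c : Int) (L : List Int) :
    pvU (L ++ [c]) = pvU L + (if L.count c = 0 then 1 else 0) := by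
  rw [pvU_perm _ _ (List.perm_append_singleton c L)]; exact pvU_cons c L

lemma pvT_cons (c : Int) (L : List Int) :
    pvT (c :: L) = pvT L + (if L.count c = 1 then 1 else 0) := by
  unfold pvT
  rw [List.toFinset_cons, Finset.filter_insert]
  rcases Nat.lt_or_ge (L.count c) 2 with hc | hc
  · interval_cases hcv : L.count c
    · -- count = 0 : c fresh
      have hnc : c ∉ L.toFinset := by
        simp only [List.mem_toFinset]
        simpa [List.count_eq_zero] using hcv
      have hcond : ¬ (2 ≤ (c :: L).count c) := by
        rw [List.count_cons_self, hcv]; omega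
      rw [if_neg hcond]
      have hfe : L.toFinset.filter (fun x => 2 ≤ (c :: L).count x)
          = L.toFinset.filter (fun x => 2 ≤ L.count x) := by
        apply Finset.filter_congr
        intro x hx
        have hxc : x ≠ c := by rintro rfl; exact hnc hx
        simp [List.count_cons, Ne.symm hxc]
      rw [hfe]; simp [hcv]
    · -- count = 1 : c crosses the boundary
      have hmem : c ∈ L.toFinset := by
        simp only [List.mem_toFinset]
        rw [← List.count_pos_iff]; omega
      have hcond : 2 ≤ (c :: L).count c := by
        rw [List.count_cons_self, hcv]
      rw [if_pos hcond]
      have hfe : L.toFinset.filter (fun x => 2 ≤ (c :: L).count x)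
          = insert c (L.toFinset.filter (fun x => 2 ≤ L.count x)) := by
        ext x
        by_cases hxc : x = c
        · subst hxc
          simp [hmem, hcv]
        · simp [Finset.mem_filter, Finset.mem_insert, hxc, List.count_cons, Ne.symm hxc]
      rw [hfe, Finset.insert_idem, Finset.card_insert_of_notMem]
      · simp
      · simp [hcv]
  · -- count ≥ 2 : nothing changes
    have hmem : c ∈ L.toFinset := by
      simp only [List.mem_toFinset]
      rw [← List.count_pos_iff]; omega
    have hcond : 2 ≤ (c :: L).count c := by
      rw [List.count_cons_self]; omega
    rw [if_pos hcond]
    have hfe : L.toFinset.filter (fun x => 2 ≤ (c :: L).count x)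
        = L.toFinset.filter (fun x => 2 ≤ L.count x) := by
      apply Finset.filter_congr
      intro x hx
      by_cases hxc : x = c
      · subst hxc; rw [List.count_cons_self]; omega
      · simp [List.count_cons, Ne.symm hxc]
    have hmemf : c ∈ L.toFinset.filter (fun x => 2 ≤ L.count x) :=
      Finset.mem_filter.mpr ⟨hmem, hc⟩
    rw [hfe, Finset.insert_eq_self.mpr hmemf]
    have hne : ¬ (L.count c = 1) := by omega
    simp [hne]

lemma pvT_append_singleton (c : Int) (L : List Int) :
    pvT (L ++ [c]) = pvT L + (if L.count c = 1 then 1 else 0) := by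
  rw [pvT_perm _ _ (List.perm_append_singleton c L)]; exact pvT_cons c L

lemma pvT_eq_pvU_iff (L : List Int) : pvT L = pvU L ↔ ∀ c ∈ L, 2 ≤ L.count c := by
  unfold pvT pvU
  constructor
  · intro h c hc
    have hsub := Finset.filter_subset (fun c => 2 ≤ L.count c) L.toFinset
    have heq := Finset.eq_of_subset_of_card_le hsub (le_of_eq h.symm)
    have : c ∈ L.toFinset.filter (fun c => 2 ≤ L.count c) := by
      rw [heq]; simpa using hc
    exact (Finset.mem_filter.mp this).2
  · intro h
    rw [Finset.filter_true_of_mem]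
    intro x hx
    exact h x (List.mem_toFinset.mp hx)

lemma pvGood_iff (h_ : Int) (L : List Int) :
    (((pvU L : Int) = h_) ∧ ((pvT L : Int) = h_)) ↔ pvGood h_ L = true := by
  unfold pvGood
  rw [Bool.and_eq_true_iff, beq_iff_eq, List.all_eq_true]
  constructor
  · rintro ⟨hU, hT⟩
    refine ⟨hU, ?_⟩
    have : pvT L = pvU L := by omega
    intro c hc
    simpa using (pvT_eq_pvU_iff L).mp this c hc
  · rintro ⟨hU, hall⟩
    refine ⟨hU, ?_⟩
    have : pvT L = pvU L := (pvT_eq_pvU_iff L).mpr (by intro c hc; simpa using hall c hc)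
    omega

lemma pvU_mono_append_singleton (L : List Int) (c : Int) : pvU L ≤ pvU (L ++ [c]) := by
  rw [pvU_append_singleton]; omega

lemma pvGood_extend (h_ : Int) (P L : List Int) (hg : pvGood h_ L = true)
    (hle : (pvU (P ++ L) : Int) ≤ h_) : pvGood h_ (P ++ L) = true := by
  obtain ⟨hU, hall⟩ := Bool.and_eq_true_iff.mp hg
  rw [beq_iff_eq] at hU
  have hUle : pvU (P ++ L) ≤ pvU L := by omega
  have hsub : L.toFinset ⊆ (P ++ L).toFinset := by
    rw [List.toFinset_append]; exact Finset.subset_union_right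
  have hfin : L.toFinset = (P ++ L).toFinset := Finset.eq_of_subset_of_card_le hsub hUle
  rw [← pvGood_iff]
  have hUeq : pvU (P ++ L) = pvU L := by unfold pvU; rw [hfin]
  constructor
  · rw [hUeq]; exact_mod_cast hU
  · have hall2 : ∀ c ∈ (P ++ L), 2 ≤ (P ++ L).count c := by
      intro c hc
      have hcL : c ∈ L := by
        have : c ∈ (P ++ L).toFinset := List.mem_toFinset.mpr hc
        rw [← hfin] at this
        exact List.mem_toFinset.mp this
      have h2 : 2 ≤ L.count c := by simpa using List.all_eq_true.mp hall c hcL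
      rw [List.count_append]; omega
    have hT : pvT (P ++ L) = pvU (P ++ L) := (pvT_eq_pvU_iff _).mpr hall2
    rw [hT, hUeq]; exact_mod_cast hU

lemma pv_foldl_max_eq_sup (g : Nat → Nat) :
    ∀ (n a : Nat), (List.range n).foldl (fun r t => max r (g t)) a = max a ((Finset.range n).sup g) := by
  intro n
  induction n with
  | zero => simp
  | succ n ih =>
    intro a
    rw [List.range_succ, List.foldl_append, ih a, Finset.range_add_one, Finset.sup_insert]
    simp only [List.foldl_cons, List.foldl_nil]
    have hs : g n ⊔ (Finset.range n).sup g = max (g n) ((Finset.range n).sup g) := rfl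
    rw [hs]
    omega

lemma pv_foldl_map_cast {β γ : Type} (φ : β → γ) (f : Int → γ → Int) (g : Nat → β → Nat)
    (l : List β) (h : ∀ (a : Nat) (x : β), x ∈ l → f (↑a) (φ x) = ↑(g a x)) :
    ∀ (a : Nat), (l.map φ).foldl f ↑a = ↑(l.foldl g a) := by
  induction l with
  | nil => intro a; simp
  | cons x t ih =>
    intro a
    simp only [List.map_cons, List.foldl_cons]
    rw [h a x (by simp)]
    exact ih (fun a y hy => h a y (by simp [hy])) (g a x)

lemma pvF_eq_zero (arr : List Int) (h_ : Int) (s j : Nat) (h : j + 1 ≤ s) :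
    pvF arr h_ s j = 0 := by
  unfold pvF; split <;> omega

lemma pv_sup_reindex (arr : List Int) (h_ : Int) (iN n : Nat) (hi : iN ≤ n) :
    (Finset.range (n - iN)).sup (fun t => pvF arr h_ iN (iN + t))
      = (Finset.range n).sup (fun j => pvF arr h_ iN j) := by
  apply le_antisymm
  · apply Finset.sup_le
    intro t ht
    rw [Finset.mem_range] at ht
    exact Finset.le_sup (f := fun j => pvF arr h_ iN j) (Finset.mem_range.mpr (by omega))
  · apply Finset.sup_le
    intro j hj
    rw [Finset.mem_range] at hj
    rcases Nat.lt_or_ge j iN with hlt | hge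
    · rw [pvF_eq_zero arr h_ iN j (by omega)]; exact Nat.zero_le _
    · have hj2 : j = iN + (j - iN) := by omega
      rw [hj2]
      exact Finset.le_sup (f := fun t => pvF arr h_ iN (iN + t)) (Finset.mem_range.mpr (by omega))

lemma pv_set_ofList_length (L : List Int) : (PySem.Set.ofList L).length = pvU L := by
  have hnd : (PySem.Set.ofList L).Nodup := PySem.Set.nodup_ofList L
  have hfin : (PySem.Set.ofList L).toFinset = L.toFinset := by
    ext x; simp [List.mem_toFinset, PySem.Set.mem_ofList]
  unfold pvU
  rw [← hfin, List.toFinset_card_of_nodup hnd]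

lemma pv_condB_iff (h_ : Int) (L : List Int) :
    (((L.foldl (fun d c => d.insert c (d.getD c 0 + 1)) (PySem.Dict.empty : PySem.Dict Int Int)).size : Int) = h_ ∧
      (L.foldl (fun d c => d.insert c (d.getD c 0 + 1)) (PySem.Dict.empty : PySem.Dict Int Int)).values.all (fun v => 2 ≤ v))
    ↔ pvGood h_ L = true := by
  have hrw : (L.foldl (fun d c => d.insert c (d.getD c 0 + 1)) (PySem.Dict.empty : PySem.Dict Int Int))
      = PySem.Dict.counter L := PySem.Dict.foldl_insert_getD_add_one_eq_counter L
  rw [hrw]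
  have hsize : (PySem.Dict.counter L).size = pvU L := by
    show (PySem.Dict.counter L).items.length = _
    rw [PySem.Dict.items_counter, List.length_map, pv_set_ofList_length]
  have hvals : (PySem.Dict.counter L).values = (PySem.Set.ofList L).map (fun c => (L.count c : Int)) := by
    show (PySem.Dict.counter L).items.map (·.2) = _
    rw [PySem.Dict.items_counter, List.map_map]
    rfl
  rw [hsize, hvals]
  unfold pvGood
  rw [Bool.and_eq_true_iff, beq_iff_eq, List.all_eq_true, List.all_eq_true]
  constructor
  · rintro ⟨hU, hall⟩
    refine ⟨hU, ?_⟩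
    intro c hc
    have := hall (L.count c : Int) (List.mem_map.mpr ⟨c, (PySem.Set.mem_ofList L c).mpr hc, rfl⟩)
    simp only [decide_eq_true_eq] at this ⊢
    exact_mod_cast this
  · rintro ⟨hU, hall⟩
    refine ⟨hU, ?_⟩
    intro v hv
    obtain ⟨c, hc, rfl⟩ := List.mem_map.mp hv
    have := hall c ((PySem.Set.mem_ofList L c).mp hc)
    simp only [decide_eq_true_eq] at this ⊢
    exact_mod_cast this

lemma pv_B_inner (arr : List Int) (h_ : Int) (iN : Nat) (hi : iN ≤ arr.length) (a : Nat) :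
    (PySem.List.pyRange (iN : Int) (arr.length : Int) 1).foldl (fun res j =>
      let seg := PySem.List.slice arr (some (iN : Int)) (some (j + 1))
      let cnt := seg.foldl (fun d c => d.insert c (d.getD c 0 + 1)) (PySem.Dict.empty : PySem.Dict Int Int)
      if (cnt.size : Int) = h_ ∧ cnt.values.all (fun v => 2 ≤ v) then
        max res (j - (iN : Int) + 1)
      else res) (↑a)
    = ↑(max a ((Finset.range arr.length).sup (fun j => pvF arr h_ iN j))) := by
  rw [PySem.List.pyRange_one]
  have hlen : ((arr.length : Int) - (iN : Int)).toNat = arr.length - iN := by omega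
  rw [hlen]
  have hseg : ∀ t : Nat, PySem.List.slice arr (some (iN : Int)) (some ((iN : Int) + (t : Int) + 1))
      = pvSeg arr iN (iN + t + 1) := by
    intro t
    have h1 : ((iN : Int) + (t : Int) + 1) = (iN : Int) + ((t + 1 : Nat) : Int) := by push_cast; ring
    rw [h1, PySem.List.slice_natCast_add]
    unfold pvSeg
    congr 1
    omega
  refine Eq.trans (pv_foldl_map_cast _ _
    (fun (b : Nat) (t : Nat) =>
      if pvGood h_ (pvSeg arr iN (iN + t + 1)) then max b (t + 1) else b)
    (List.range (arr.length - iN)) ?_ a) ?_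
  · intro b t _
    dsimp only
    rw [hseg t]
    by_cases hg : pvGood h_ (pvSeg arr iN (iN + t + 1)) = true
    · rw [if_pos ((pv_condB_iff h_ _).mpr hg), if_pos hg]
      push_cast
      omega
    · rw [if_neg (fun hc => hg ((pv_condB_iff h_ _).mp hc)), if_neg hg]
  · congr 1
    have hfe : (fun (b : Nat) (t : Nat) =>
        if pvGood h_ (pvSeg arr iN (iN + t + 1)) then max b (t + 1) else b)
        = fun (b : Nat) (t : Nat) => max b (pvF arr h_ iN (iN + t)) := by
      funext b t
      unfold pvF
      have h1 : iN + t + 1 - iN = t + 1 := by omega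
      rw [h1]
      split <;> omega
    rw [hfe, pv_foldl_max_eq_sup, pv_sup_reindex arr h_ iN arr.length hi]

lemma pv_B_eq (arr : List Int) (h_ : Int) :
    lsForUniqueChar_alt arr h_
      = ↑((Finset.range arr.length).sup (fun i =>
          (Finset.range arr.length).sup (fun j => pvF arr h_ i j))) := by
  unfold lsForUniqueChar_alt
  rw [PySem.List.pyRange_one]
  have hlen : ((arr.length : Int) - 0).toNat = arr.length := by omega
  rw [hlen]
  refine Eq.trans (pv_foldl_map_cast _ _
    (fun (b : Nat) (i : Nat) =>
      max b ((Finset.range arr.length).sup (fun j => pvF arr h_ i j)))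
    (List.range arr.length) ?_ 0) ?_
  · intro b i hi
    rw [List.mem_range] at hi
    dsimp only
    simp only [zero_add]
    exact pv_B_inner arr h_ i (by omega) b
  · rw [pv_foldl_max_eq_sup]
    simp

-- the loop invariant of A after k outer iterations
def pvInv (arr : List Int) (h_ : Int) (k : Nat)
    (S : PySem.Dict Int Int × Int × Int × Int × Int) : Prop :=
  ∃ st : Nat, st ≤ k ∧ S.2.2.2.1 = ↑st ∧
    (∀ c : Int, S.1.getD c 0 = ((pvSeg arr st k).count c : Int)) ∧
    S.2.1 = ↑(pvU (pvSeg arr st k)) ∧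
    S.2.2.1 = ↑(pvT (pvSeg arr st k)) ∧
    (((pvU (pvSeg arr st k) : Int) ≤ h_) ∨ st = k) ∧
    (∀ s : Nat, s < st → h_ < ↑(pvU (pvSeg arr s k))) ∧
    S.2.2.2.2 = ↑(pvM arr h_ k)

lemma pvGood_U (h_ : Int) (L : List Int) (h : pvGood h_ L = true) : (pvU L : Int) = h_ := by
  unfold pvGood at h
  exact beq_iff_eq.mp (Bool.and_eq_true_iff.mp h).1

lemma pv_shrink_spec (arr : List Int) (h_ : Int) (k : Nat) (hk : k < arr.length) :
    ∀ (fuel st : Nat) (count : PySem.Dict Int Int) (u t : Int),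
      fuel = k + 1 - st → st ≤ k + 1 →
      (∀ c, count.getD c 0 = ((pvSeg arr st (k + 1)).count c : Int)) →
      u = ↑(pvU (pvSeg arr st (k + 1))) → t = ↑(pvT (pvSeg arr st (k + 1))) →
      ∃ st' : Nat, st ≤ st' ∧ st' ≤ k + 1 ∧
        (shrinkA arr h_ ↑k count u t ↑st).2.2.2 = ↑st' ∧
        (∀ c, (shrinkA arr h_ ↑k count u t ↑st).1.getD c 0 = ((pvSeg arr st' (k + 1)).count c : Int)) ∧
        (shrinkA arr h_ ↑k count u t ↑st).2.1 = ↑(pvU (pvSeg arr st' (k + 1))) ∧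
        (shrinkA arr h_ ↑k count u t ↑st).2.2.1 = ↑(pvT (pvSeg arr st' (k + 1))) ∧
        (((pvU (pvSeg arr st' (k + 1)) : Int) ≤ h_) ∨ st' = k + 1) ∧
        (∀ s : Nat, st ≤ s → s < st' → h_ < ↑(pvU (pvSeg arr s (k + 1)))) := by
  intro fuel
  induction fuel with
  | zero =>
    intro st count u t hfuel hst hcnt hu ht
    have hst' : st = k + 1 := by omega
    have hres : shrinkA arr h_ ↑k count u t ↑st = (count, u, t, ↑st) := by
      rw [shrinkA, dif_neg]
      intro hc
      have : st ≤ k := by exact_mod_cast hc.1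
      omega
    exact ⟨st, le_rfl, hst, by rw [hres], by rw [hres]; exact hcnt,
      by rw [hres]; exact hu, by rw [hres]; exact ht, Or.inr hst', by omega⟩
  | succ f ih =>
    intro st count u t hfuel hst hcnt hu ht
    by_cases hcond : ((st : Int) ≤ (k : Int) ∧ u > h_)
    · -- the loop body runs once, then we recurse at st+1
      have hstk : st ≤ k := by exact_mod_cast hcond.1
      have hslen : st < arr.length := by omega
      have hc0 : PySem.List.pyGetD arr (st : Int) 0 = arr[st] := by
        rw [PySem.List.pyGetD_natCast]
        exact List.getD_eq_getElem arr 0 hslen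
      have hLcons : pvSeg arr st (k + 1) = arr[st] :: pvSeg arr (st + 1) (k + 1) :=
        pvSeg_cons arr st (k + 1) (by omega) hslen
      set c0 := arr[st] with hc0def
      set T := pvSeg arr (st + 1) (k + 1) with hTdef
      have hm : (pvSeg arr st (k + 1)).count c0 = T.count c0 + 1 := by
        rw [hLcons, List.count_cons_self]
      have hUL : pvU (pvSeg arr st (k + 1)) = pvU T + (if T.count c0 = 0 then 1 else 0) := by
        rw [hLcons]; exact pvU_cons c0 T
      have hTL : pvT (pvSeg arr st (k + 1)) = pvT T + (if T.count c0 = 1 then 1 else 0) := by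
        rw [hLcons]; exact pvT_cons c0 T
      have hcntc0 : count.getD c0 0 = ((T.count c0 : Int)) + 1 := by
        rw [hcnt c0, hm]; push_cast; ring
      have hstep : shrinkA arr h_ ↑k count u t ↑st
          = shrinkA arr h_ ↑k (count.modify c0 0 (· - 1))
              (if count.getD c0 0 = 1 then u - 1 else u)
              (if count.getD c0 0 = 2 then t - 1 else t) ((st : Int) + 1) := by
        rw [shrinkA, dif_pos hcond, hc0]
      have hcnt' : ∀ c, (count.modify c0 0 (· - 1)).getD c 0 = ((T.count c : Int)) := by
        intro c
        rw [PySem.Dict.getD_modify]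
        by_cases hcc : c = c0
        · rw [if_pos hcc, hcc, hcntc0]; ring
        · rw [if_neg hcc, hcnt c, hLcons]
          simp [Ne.symm hcc]
      have hu' : (if count.getD c0 0 = 1 then u - 1 else u) = ↑(pvU T) := by
        by_cases hm0 : T.count c0 = 0
        · rw [if_pos (by rw [hcntc0, hm0]; norm_num), hu, hUL, if_pos hm0]; push_cast; ring
        · rw [if_neg (by rw [hcntc0]; intro hh; exact hm0 (by omega)), hu, hUL, if_neg hm0]
          push_cast; ring
      have ht' : (if count.getD c0 0 = 2 then t - 1 else t) = ↑(pvT T) := by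
        by_cases hm1 : T.count c0 = 1
        · rw [if_pos (by rw [hcntc0, hm1]; norm_num), ht, hTL, if_pos hm1]; push_cast; ring
        · rw [if_neg (by rw [hcntc0]; intro hh; exact hm1 (by omega)), ht, hTL, if_neg hm1]
          push_cast; ring
      obtain ⟨st', hge, hle', hres1, hres2, hres3, hres4, hdisj, hmin⟩ :=
        ih (st + 1) (count.modify c0 0 (· - 1))
          (if count.getD c0 0 = 1 then u - 1 else u)
          (if count.getD c0 0 = 2 then t - 1 else t)
          (by omega) (by omega) hcnt' hu' ht'
      have hcast : ((st : Int) + 1) = ((st + 1 : Nat) : Int) := by push_cast; ring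
      rw [hcast] at hstep
      refine ⟨st', by omega, hle', by rw [hstep]; exact hres1, by rw [hstep]; exact hres2,
        by rw [hstep]; exact hres3, by rw [hstep]; exact hres4, hdisj, ?_⟩
      intro s hs1 hs2
      rcases Nat.eq_or_lt_of_le hs1 with hse | hslt
      · rw [← hse]
        rw [hu] at hcond
        exact hcond.2
      · exact hmin s (by omega) hs2
    · -- the loop exits immediately
      have hres : shrinkA arr h_ ↑k count u t ↑st = (count, u, t, ↑st) := by
        rw [shrinkA, dif_neg hcond]
      refine ⟨st, le_rfl, hst, by rw [hres], by rw [hres]; exact hcnt,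
        by rw [hres]; exact hu, by rw [hres]; exact ht, ?_, by omega⟩
      rcases Nat.lt_or_ge st (k + 1) with hlt | hge
      · left
        have hik : (st : Int) ≤ (k : Int) := by exact_mod_cast Nat.lt_succ_iff.mp hlt
        have hnu : ¬ (u > h_) := fun hgt => hcond ⟨hik, hgt⟩
        rw [hu] at hnu; omega
      · right; omega

lemma pvM_zero (arr : List Int) (h_ : Int) : pvM arr h_ 0 = 0 := by
  simp [pvM]

lemma pv_sup_succ (g : Nat → Nat) (k : Nat) :
    (Finset.range (k + 1)).sup g = max ((Finset.range k).sup g) (g k) := by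
  rw [Finset.range_add_one, Finset.sup_insert]
  show max (g k) _ = _
  exact max_comm _ _

lemma pvM_succ (arr : List Int) (h_ : Int) (k : Nat) :
    pvM arr h_ (k + 1)
      = max (pvM arr h_ k) ((Finset.range (k + 1)).sup (fun s => pvF arr h_ s k)) := by
  unfold pvM
  exact pv_sup_succ _ k

-- the key window argument: the unique candidate A tests at step k is the best window ending at k
lemma pv_val_eq (arr : List Int) (h_ : Int) (k : Nat) (hk : k < arr.length) (st' : Nat)
    (h1 : st' ≤ k + 1)
    (hmin : ∀ s : Nat, s < st' → h_ < ↑(pvU (pvSeg arr s (k + 1))))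
    (hle : ((pvU (pvSeg arr st' (k + 1)) : Int) ≤ h_) ∨ st' = k + 1) :
    (Finset.range (k + 1)).sup (fun s => pvF arr h_ s k)
      = if pvGood h_ (pvSeg arr st' (k + 1)) then k + 1 - st' else 0 := by
  have hbound : ∀ s, s ∈ Finset.range (k + 1) →
      pvF arr h_ s k ≤ (if pvGood h_ (pvSeg arr st' (k + 1)) then k + 1 - st' else 0) := by
    intro s hs
    rw [Finset.mem_range] at hs
    by_cases hg : pvGood h_ (pvSeg arr s (k + 1)) = true
    · -- any good window starts at or after st', and then the window at st' is good too
      have hU : (pvU (pvSeg arr s (k + 1)) : Int) = h_ := pvGood_U h_ _ hg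
      have hsge : st' ≤ s := by
        by_contra hlt
        have := hmin s (by omega)
        omega
    
      have hne : st' ≠ k + 1 := by omega
      have hle2 : (pvU (pvSeg arr st' (k + 1)) : Int) ≤ h_ := hle.resolve_right hne
      have hdec := pvSeg_decomp arr st' s (k + 1) hsge (by omega)
      have hgood' : pvGood h_ (pvSeg arr st' (k + 1)) = true := by
        rw [hdec]
        rw [hdec] at hle2
        exact pvGood_extend h_ _ _ hg hle2
      rw [if_pos hgood']
      unfold pvF
      rw [if_pos hg]
      omega
    · unfold pvF
      rw [if_neg hg]
      exact Nat.zero_le _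
  by_cases hgood : pvGood h_ (pvSeg arr st' (k + 1)) = true
  · rw [if_pos hgood]
    rw [if_pos hgood] at hbound
    rcases Nat.lt_or_ge st' (k + 1) with hlt | hge
    · apply le_antisymm (Finset.sup_le hbound)
      have : pvF arr h_ st' k = k + 1 - st' := by
        unfold pvF; rw [if_pos hgood]
      rw [← this]
      exact Finset.le_sup (f := fun s => pvF arr h_ s k) (Finset.mem_range.mpr hlt)
    · have hz : k + 1 - st' = 0 := by omega
      rw [hz]
      rw [hz] at hbound
      exact Nat.le_zero.mp (Finset.sup_le hbound)
  · rw [if_neg hgood]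
    rw [if_neg hgood] at hbound
    exact Nat.le_zero.mp (Finset.sup_le hbound)

lemma pv_step (arr : List Int) (h_ : Int) (k : Nat) (hk : k < arr.length)
    (S : PySem.Dict Int Int × Int × Int × Int × Int) (hS : pvInv arr h_ k S) :
    pvInv arr h_ (k + 1) (stepA arr h_ S ((k : Int), arr[k])) := by
  obtain ⟨count, u, t, start, res⟩ := S
  obtain ⟨st, hstk, hstart, hcnt, hu, ht, hdisj0, hmin0, hres⟩ := hS
  simp only at hstart hcnt hu ht hres
  subst hstart
  set c := arr[k] with hcdef
  have hsucc : pvSeg arr st (k + 1) = pvSeg arr st k ++ [c] :=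
    pvSeg_succ arr st k hstk hk
  -- state after the three increment lines
  have hcnt1 : ∀ x, (count.modify c 0 (· + 1)).getD x 0 = ((pvSeg arr st (k + 1)).count x : Int) := by
    intro x
    rw [PySem.Dict.getD_modify, hsucc]
    by_cases hxc : x = c
    · have hone : List.count c [c] = 1 := by simp
      rw [if_pos hxc, hxc, hcnt c, List.count_append, hone]
      push_cast; ring
    · have hcx : ¬ c = x := fun h => hxc h.symm
      have hzero : List.count x [c] = 0 := by simp [hcx]
      rw [if_neg hxc, hcnt x, List.count_append, hzero]
      simp
  have hcntc : (count.modify c 0 (· + 1)).getD c 0 = ((pvSeg arr st k).count c : Int) + 1 := by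
    have hone : List.count c [c] = 1 := by simp
    rw [hcnt1 c, hsucc, List.count_append, hone]
    push_cast; ring
  have hu1 : (if (count.modify c 0 (· + 1)).getD c 0 = 1 then u + 1 else u)
      = ↑(pvU (pvSeg arr st (k + 1))) := by
    rw [hsucc, pvU_append_singleton]
    by_cases hz : (pvSeg arr st k).count c = 0
    · rw [if_pos (by rw [hcntc, hz]; norm_num), hu, if_pos hz]; push_cast; ring
    · rw [if_neg (by rw [hcntc]; intro hh; exact hz (by omega)), hu, if_neg hz]; push_cast; ring
  have ht1 : (if (count.modify c 0 (· + 1)).getD c 0 = 2 then t + 1 else t)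
      = ↑(pvT (pvSeg arr st (k + 1))) := by
    rw [hsucc, pvT_append_singleton]
    by_cases hz : (pvSeg arr st k).count c = 1
    · rw [if_pos (by rw [hcntc, hz]; norm_num), ht, if_pos hz]; push_cast; ring
    · rw [if_neg (by rw [hcntc]; intro hh; exact hz (by omega)), ht, if_neg hz]; push_cast; ring
  obtain ⟨st', hge, hle', hres1, hres2, hres3, hres4, hdisj, hminr⟩ :=
    pv_shrink_spec arr h_ k hk (k + 1 - st) st (count.modify c 0 (· + 1))
      (if (count.modify c 0 (· + 1)).getD c 0 = 1 then u + 1 else u)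
      (if (count.modify c 0 (· + 1)).getD c 0 = 2 then t + 1 else t)
      rfl (by omega) hcnt1 hu1 ht1
  have hminall : ∀ s : Nat, s < st' → h_ < ↑(pvU (pvSeg arr s (k + 1))) := by
    intro s hs
    rcases Nat.lt_or_ge s st with hlt | hge2
    · have h0 := hmin0 s hlt
      have hsk : pvSeg arr s (k + 1) = pvSeg arr s k ++ [c] :=
        pvSeg_succ arr s k (by omega) hk
      have hmono := pvU_mono_append_singleton (pvSeg arr s k) c
      rw [hsk]
      push_cast
      omega
    · exact hminr s hge2 hs
  refine ⟨st', hle', ?_, ?_, ?_, ?_, hdisj, hminall, ?_⟩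
  · simp only [stepA]
    exact hres1
  · simp only [stepA]
    exact hres2
  · simp only [stepA]
    exact hres3
  · simp only [stepA]
    exact hres4
  · -- the result component
    simp only [stepA]
    rw [hres3, hres4, hres1, hres, pvM_succ,
      pv_val_eq arr h_ k hk st' hle' hminall hdisj]
    by_cases hgood : pvGood h_ (pvSeg arr st' (k + 1)) = true
    · rw [if_pos hgood, if_pos ?_]
      · push_cast [Nat.cast_max]
        congr 1
        omega
      · constructor
        · exact_mod_cast pvGood_U h_ _ hgood
        · have hTU : pvT (pvSeg arr st' (k + 1)) = pvU (pvSeg arr st' (k + 1)) := by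
            rw [pvT_eq_pvU_iff]
            unfold pvGood at hgood
            intro x hx
            simpa using List.all_eq_true.mp (Bool.and_eq_true_iff.mp hgood).2 x hx
          rw [hTU]
          exact_mod_cast pvGood_U h_ _ hgood
    · rw [if_neg hgood, if_neg ?_]
      · simp
      · intro hcond
        apply hgood
        rw [← pvGood_iff]
        refine ⟨by exact_mod_cast hcond.1, ?_⟩
        exact_mod_cast hcond.2

lemma pv_A_inv (arr : List Int) (h_ : Int) :
    ∀ k : Nat, k ≤ arr.length →
      pvInv arr h_ k (((PySem.List.enumerate arr 0).take k).foldl (stepA arr h_)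
        (PySem.Dict.empty, 0, 0, 0, 0)) := by
  intro k
  induction k with
  | zero =>
    intro _
    refine ⟨0, le_rfl, rfl, ?_, ?_, ?_, Or.inr rfl, by omega, ?_⟩
    · intro x
      simp [pvSeg, PySem.Dict.getD_empty]
    · simp [pvSeg, pvU]
    · simp [pvSeg, pvT]
    · simp [pvM_zero]
  | succ k ih =>
    intro hk1
    have hk : k < arr.length := by omega
    have htake : (PySem.List.enumerate arr 0).take (k + 1)
        = (PySem.List.enumerate arr 0).take k ++ [((k : Int), arr[k])] := by
      rw [List.take_add_one]
      congr 1
      rw [PySem.List.getElem?_enumerate, List.getElem?_eq_getElem hk]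
      simp
    rw [htake, List.foldl_append]
    simp only [List.foldl_cons, List.foldl_nil]
    exact pv_step arr h_ k hk _ (ih (by omega))

lemma pv_A_eq (arr : List Int) (h_ : Int) :
    lsForUniqueChar arr h_ = ↑(pvM arr h_ arr.length) := by
  have hinv := pv_A_inv arr h_ arr.length le_rfl
  rw [List.take_of_length_le (by rw [PySem.List.length_enumerate])] at hinv
  obtain ⟨st, _, _, _, _, _, _, _, hres⟩ := hinv
  exact hres

lemma pv_M_eq_B (arr : List Int) (h_ : Int) :
    pvM arr h_ arr.length
      = (Finset.range arr.length).sup (fun i =>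
          (Finset.range arr.length).sup (fun j => pvF arr h_ i j)) := by
  unfold pvM
  have h1 : ∀ j ∈ Finset.range arr.length,
      (Finset.range (j + 1)).sup (fun s => pvF arr h_ s j)
        = (Finset.range arr.length).sup (fun s => pvF arr h_ s j) := by
    intro j hj
    rw [Finset.mem_range] at hj
    apply le_antisymm
    · apply Finset.sup_mono
      intro x hx
      rw [Finset.mem_range] at hx ⊢
      omega
    · apply Finset.sup_le
      intro s hs
      rw [Finset.mem_range] at hs
      rcases Nat.lt_or_ge s (j + 1) with hlt | hge
      · exact Finset.le_sup (f := fun s => pvF arr h_ s j) (Finset.mem_range.mpr hlt)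
      · rw [pvF_eq_zero arr h_ s j (by omega)]
        exact Nat.zero_le _
  rw [Finset.sup_congr rfl h1]
  exact Finset.sup_comm _ _ _

theorem lsForUniqueChar_spec : Claim_equal_lsForUniqueChar := by
  intro arr h_ _
  unfold Spec_lsForUniqueChar
  rw [pv_A_eq, pv_B_eq, pv_M_eq_B]
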